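-- pv_equiv track=rewrite | github.com/Harecharan-Developer/LeetCode | 1048.py | isPredecessor
-- ===== SOURCE A (Python) =====
-- def isPredecessor(word1, word2):
--     if len(word1) + 1 != len(word2):
--         return False
--
--     i = j = 0
--     found_difference = False
--
--     while i < len(word1) and j < len(word2):
--         if word1[i] != word2[j]:
--             if found_difference:
--                 return False
--             found_difference = True
--             j += 1
--         else:
--             i += 1
--             j += 1
--
--     return True
-- ===== SOURCE B (Python) =====
-- def isPredecessor(word1, word2):
--     for k in range(len(word2)):
--         if word2[:k] + word2[k+1:] == word1:
--             return True
--     return False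
-- ===== Notes on version B (the rewrite author's own statement) =====
-- stated objective: alternative
-- what changed: Replaces A's length guard plus two-pointer difference-counting scan by enumerating every single-character deletion of word2 and comparing the whole candidate string to word1.
import Mathlib
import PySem

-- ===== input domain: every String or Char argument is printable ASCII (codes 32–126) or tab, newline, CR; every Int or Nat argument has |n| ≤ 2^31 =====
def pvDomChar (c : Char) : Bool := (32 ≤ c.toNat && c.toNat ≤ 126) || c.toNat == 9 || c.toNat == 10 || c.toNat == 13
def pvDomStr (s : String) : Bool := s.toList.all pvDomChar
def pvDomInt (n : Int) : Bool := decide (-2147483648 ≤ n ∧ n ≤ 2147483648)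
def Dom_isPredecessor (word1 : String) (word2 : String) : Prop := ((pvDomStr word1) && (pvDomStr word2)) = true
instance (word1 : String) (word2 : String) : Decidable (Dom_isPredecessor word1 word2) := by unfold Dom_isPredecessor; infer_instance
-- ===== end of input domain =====

-- B enumerates every single-character deletion of word2 and compares whole strings,
-- instead of A's length guard plus two-pointer difference-counting scan (objective: alternative).

-- ===== PORT A =====
-- the while loop of A: the suffixes of word1/word2 stand for the pointers i/j
def pvLoopA : List Char → List Char → Bool → Bool
  | a :: as, b :: bs, fd =>
    if a ≠ b then
      (if fd then false else pvLoopA (a :: as) bs true)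
    else
      pvLoopA as bs fd
  | _, _, _ => true
termination_by _ l2 _ => l2.length

def isPredecessor (word1 : String) (word2 : String) : Bool :=
  if word1.toList.length + 1 ≠ word2.toList.length then false
  else pvLoopA word1.toList word2.toList false

-- ===== PORT B =====
-- for k in range(len(word2)): if word2[:k] + word2[k+1:] == word1: return True; return False
def isPredecessor_alt (word1 : String) (word2 : String) : Bool :=
  (List.range word2.toList.length).any (fun k =>
    (word2.toList.take k ++ word2.toList.drop (k + 1)) == word1.toList)

-- ===== PRECONDITION & SPEC =====
def Spec_isPredecessor (word1 : String) (word2 : String) (out : Bool) : Prop := out = isPredecessor_alt word1 word2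
instance (word1 : String) (word2 : String) (out : Bool) : Decidable (Spec_isPredecessor word1 word2 out) := by unfold Spec_isPredecessor; infer_instance

-- ===== CLAIM (what is proved, stated in full; the proofs are below) =====
def Claim_equal_isPredecessor : Prop := ∀ (word1 : String) (word2 : String), Dom_isPredecessor word1 word2 → Spec_isPredecessor word1 word2 (isPredecessor word1 word2)

-- ===== LEMMAS AND PROOFS =====

theorem pvLoopA_same (a : Char) (as bs : List Char) (fd : Bool) :
    pvLoopA (a :: as) (a :: bs) fd = pvLoopA as bs fd := by
  simp [pvLoopA]

theorem pvLoopA_diff_false {a b : Char} (as bs : List Char) (h : a ≠ b) :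
    pvLoopA (a :: as) (b :: bs) false = pvLoopA (a :: as) bs true := by
  simp [pvLoopA, h]

theorem pvLoopA_diff_true {a b : Char} (as bs : List Char) (h : a ≠ b) :
    pvLoopA (a :: as) (b :: bs) true = false := by
  simp [pvLoopA, h]

-- the loop with found_difference = True accepts exactly equal remainders (given equal lengths)
theorem pvLoopA_true (l1 l2 : List Char) (h : l1.length = l2.length) :
    pvLoopA l1 l2 true = true ↔ l1 = l2 := by
  induction l1 generalizing l2 with
  | nil =>
    cases l2 with
    | nil => simp [pvLoopA]
    | cons b bs => simp at h
  | cons a as ih =>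
    cases l2 with
    | nil => simp at h
    | cons b bs =>
      by_cases hab : a = b
      · subst hab
        rw [pvLoopA_same, ih bs (by simpa using h)]
        simp
      · rw [pvLoopA_diff_true as bs hab]
        simp [hab]

-- the loop with found_difference = False accepts exactly the one-deletion candidates
theorem pvLoopA_false (l1 l2 : List Char) (h : l1.length + 1 = l2.length) :
    pvLoopA l1 l2 false = true ↔
      ∃ k, k < l2.length ∧ l2.take k ++ l2.drop (k + 1) = l1 := by
  induction l1 generalizing l2 with
  | nil =>
    cases l2 with
    | nil => simp at h
    | cons b bs =>
      have hbs : bs = [] := by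
        cases bs with
        | nil => rfl
        | cons c cs => simp at h
      subst hbs
      constructor
      · intro _; exact ⟨0, by simp, by simp⟩
      · intro _; simp [pvLoopA]
  | cons a as ih =>
    cases l2 with
    | nil => simp at h
    | cons b bs =>
      by_cases hab : a = b
      · subst hab
        have hlen : as.length + 1 = bs.length := by simpa using h
        rw [pvLoopA_same, ih bs hlen]
        constructor
        · rintro ⟨k, hk, hdel⟩
          exact ⟨k + 1, by simpa using hk, by simp [List.take_succ_cons, hdel]⟩
        · rintro ⟨k, hk, hdel⟩
          cases k with
          | zero =>
            -- candidate is bs itself; bs = a :: as, so deleting the head of bs also works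
            simp at hdel
            refine ⟨0, by omega, ?_⟩
            simp [hdel]
          | succ j =>
            simp only [List.take_succ_cons, List.drop_succ_cons, List.cons_append,
              List.cons.injEq] at hdel
            exact ⟨j, by simpa using hk, hdel.2⟩
      · have hlen : (a :: as).length = bs.length := by simp at h ⊢; omega
        rw [pvLoopA_diff_false as bs hab, pvLoopA_true (a :: as) bs hlen]
        constructor
        · intro hbs
          exact ⟨0, by simp, by simp [hbs]⟩
        · rintro ⟨k, hk, hdel⟩
          cases k with
          | zero => simp at hdel; exact hdel.symm
          | succ j =>
            exfalso
            simp only [List.take_succ_cons, List.drop_succ_cons, List.cons_append,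
              List.cons.injEq] at hdel
            exact hab hdel.1.symm

-- every one-deletion candidate of l2 has length (l2.length - 1)
theorem pvCandidate_length (l2 : List Char) (k : ℕ) (hk : k < l2.length) :
    (l2.take k ++ l2.drop (k + 1)).length = l2.length - 1 := by
  simp [List.length_take, List.length_drop]
  omega

-- ===== VERDICT (by name: the statement is the Claim_ definition above) =====
theorem isPredecessor_spec : Claim_equal_isPredecessor := by
  intro word1 word2 _
  unfold Spec_isPredecessor isPredecessor isPredecessor_alt
  set l1 := word1.toList
  set l2 := word2.toList
  by_cases hlen : l1.length + 1 = l2.length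
  · rw [if_neg (by omega)]
    rcases Bool.eq_false_or_eq_true (pvLoopA l1 l2 false) with hA | hA
    · rw [hA]
      symm
      rw [List.any_eq_true]
      obtain ⟨k, hk, hdel⟩ := (pvLoopA_false l1 l2 hlen).1 hA
      exact ⟨k, List.mem_range.2 hk, beq_iff_eq.2 hdel⟩
    · rw [hA]
      symm
      rw [List.any_eq_false]
      intro k hk
      rw [List.mem_range] at hk
      intro hcand
      rw [beq_iff_eq] at hcand
      have : pvLoopA l1 l2 false = true := (pvLoopA_false l1 l2 hlen).2 ⟨k, hk, hcand⟩
      rw [hA] at this; simp at this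
  · rw [if_pos hlen]
    symm
    rw [List.any_eq_false]
    intro k hk
    rw [List.mem_range] at hk
    intro hcand
    rw [beq_iff_eq] at hcand
    have := pvCandidate_length l2 k hk
    rw [hcand] at this
    omega
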